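-- pv_equiv track=rewrite | github.com/Kunze-Ritter/Manual2Vector | scripts/visualize_foliant_config.py | find_incompatibilities
-- ===== SOURCE A (Python) =====
-- from collections import defaultdict
--
-- def find_incompatibilities(configs, all_accessories):
--     """Find accessories that never appear together"""
--
--     incompatibilities = defaultdict(set)
--
--     # For each pair of accessories
--     for i, acc1 in enumerate(all_accessories):
--         for acc2 in all_accessories[i+1:]:
--             # Check if they ever appear together
--             appear_together = False
--
--             for config in configs:
--                 if acc1 in config and acc2 in config:
--                     appear_together = True
--                     break
--
--             # If they never appear together, they might be incompatible
--             if not appear_together: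
--                 # But only if both appear in at least one config
--                 acc1_appears = any(acc1 in config for config in configs)
--                 acc2_appears = any(acc2 in config for config in configs)
--
--                 if acc1_appears and acc2_appears:
--                     incompatibilities[acc1].add(acc2)
--                     incompatibilities[acc2].add(acc1)
--
--     return incompatibilities
-- ===== SOURCE B (Python) =====
-- from collections import defaultdict
--
-- def find_incompatibilities(configs, all_accessories):
--     """Find accessories that never appear together (one pass over configs, then pair enumeration)"""
--     acc_set = set(all_accessories)
--     appearing = set()
--     together = set()
--     for config in configs:
--         present = [a for a in config if a in acc_set]
--         for x in present:
--             appearing.add(x)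
--             for y in present:
--                 together.add((x, y))
--     incompatibilities = defaultdict(set)
--     for i, acc1 in enumerate(all_accessories):
--         for acc2 in all_accessories[i+1:]:
--             if acc1 in appearing and acc2 in appearing and (acc1, acc2) not in together:
--                 incompatibilities[acc1].add(acc2)
--                 incompatibilities[acc2].add(acc1)
--     return incompatibilities
-- ===== Notes on version B (the rewrite author's own statement) =====
-- stated objective: faster
-- what changed: Instead of scanning all configs for every accessory pair, B makes one pass over configs to record appearing accessories and co-occurring pairs in hash sets, then enumerates pairs with O(1) lookups.
import Mathlib
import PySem

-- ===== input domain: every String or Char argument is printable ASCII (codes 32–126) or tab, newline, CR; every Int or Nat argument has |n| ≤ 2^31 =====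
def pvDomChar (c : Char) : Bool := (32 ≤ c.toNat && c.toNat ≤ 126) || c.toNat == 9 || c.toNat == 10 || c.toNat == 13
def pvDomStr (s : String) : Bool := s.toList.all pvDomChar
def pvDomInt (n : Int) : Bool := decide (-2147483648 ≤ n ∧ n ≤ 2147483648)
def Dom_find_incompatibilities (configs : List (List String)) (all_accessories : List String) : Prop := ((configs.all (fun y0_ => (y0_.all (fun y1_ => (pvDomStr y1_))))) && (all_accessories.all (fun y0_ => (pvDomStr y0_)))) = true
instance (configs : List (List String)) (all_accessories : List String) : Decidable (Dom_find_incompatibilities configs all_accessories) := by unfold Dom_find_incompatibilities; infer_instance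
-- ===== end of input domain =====

-- B replaces A's per-pair scan of all configs by one pass over configs that records
-- appearing accessories and co-occurring pairs in sets, then enumerates pairs (objective: faster).


-- ===== PORT A =====
def find_incompatibilities (configs : List (List String)) (all_accessories : List String) : List (String × List String) :=
  let incompatibilities : PySem.Dict String (PySem.Set String) :=
    (PySem.List.enumerate all_accessories 0).foldl (fun d p =>
      (PySem.List.slice all_accessories (some (p.1 + 1)) none).foldl (fun d acc2 =>
        -- for config in configs: if acc1 in config and acc2 in config: appear_together = True; break
        let appear_together := configs.any (fun config => config.contains p.2 && config.contains acc2)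
        if !appear_together then
          let acc1_appears := configs.any (fun config => config.contains p.2)
          let acc2_appears := configs.any (fun config => config.contains acc2)
          if acc1_appears && acc2_appears then
            (PySem.Dict.modify d p.2 PySem.Set.empty (fun s => PySem.Set.add s acc2)).modify acc2 PySem.Set.empty (fun s => PySem.Set.add s p.2)
          else d
        else d) d) PySem.Dict.empty
  incompatibilities.items

-- ===== PORT B =====
-- one config's contribution: add its present accessories and all co-occurring pairs
def pvMark (present : List String)
    (st : PySem.Set String × PySem.Set (String × String)) :
    PySem.Set String × PySem.Set (String × String) :=
  present.foldl (fun st x =>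
    (PySem.Set.add st.1 x, present.foldl (fun tg y => PySem.Set.add tg (x, y)) st.2)) st

def find_incompatibilities_alt (configs : List (List String)) (all_accessories : List String) : List (String × List String) :=
  let acc_set := PySem.Set.ofList all_accessories
  let st := configs.foldl (fun st config =>
      pvMark (config.filter (fun a => PySem.Set.contains acc_set a)) st)
    (PySem.Set.empty, PySem.Set.empty)
  let appearing := st.1
  let together := st.2
  let incompatibilities : PySem.Dict String (PySem.Set String) :=
    (PySem.List.enumerate all_accessories 0).foldl (fun d p =>
      (PySem.List.slice all_accessories (some (p.1 + 1)) none).foldl (fun d acc2 =>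
        if PySem.Set.contains appearing p.2 && PySem.Set.contains appearing acc2 &&
            !(PySem.Set.contains together (p.2, acc2)) then
          (PySem.Dict.modify d p.2 PySem.Set.empty (fun s => PySem.Set.add s acc2)).modify acc2 PySem.Set.empty (fun s => PySem.Set.add s p.2)
        else d) d) PySem.Dict.empty
  incompatibilities.items

-- ===== PRECONDITION & SPEC =====
def Spec_find_incompatibilities (configs : List (List String)) (all_accessories : List String) (out : List (String × List String)) : Prop := out = find_incompatibilities_alt configs all_accessories
instance (configs : List (List String)) (all_accessories : List String) (out : List (String × List String)) : Decidable (Spec_find_incompatibilities configs all_accessories out) := by unfold Spec_find_incompatibilities; infer_instance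

-- ===== CLAIM (what is proved, stated in full; the proofs are below) =====
def Claim_equal_find_incompatibilities : Prop := ∀ (configs : List (List String)) (all_accessories : List String), Dom_find_incompatibilities configs all_accessories → Spec_find_incompatibilities configs all_accessories (find_incompatibilities configs all_accessories)

-- ===== LEMMAS AND PROOFS =====

theorem pvMark_aux_fst (present l : List String)
    (st : PySem.Set String × PySem.Set (String × String)) (a : String) :
    a ∈ (l.foldl (fun st x =>
      (PySem.Set.add st.1 x, present.foldl (fun tg y => PySem.Set.add tg (x, y)) st.2)) st).1 ↔
    a ∈ st.1 ∨ a ∈ l := by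
  induction l generalizing st with
  | nil => simp
  | cons x t ih =>
    simp only [List.foldl_cons, ih, PySem.Set.mem_add, List.mem_cons]
    tauto

theorem pvMark_aux_snd (present l : List String)
    (st : PySem.Set String × PySem.Set (String × String)) (q : String × String) :
    q ∈ (l.foldl (fun st x =>
      (PySem.Set.add st.1 x, present.foldl (fun tg y => PySem.Set.add tg (x, y)) st.2)) st).2 ↔
    q ∈ st.2 ∨ ∃ x ∈ l, x = q.1 ∧ q.2 ∈ present := by
  induction l generalizing st with
  | nil => simp
  | cons x t ih =>
    simp only [List.foldl_cons, ih, PySem.Set.mem_foldl_add, List.mem_cons]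
    constructor
    · rintro ((h | ⟨b, hb, hq⟩) | ⟨x', hx', hxe, hy⟩)
      · exact Or.inl h
      · exact Or.inr ⟨x, Or.inl rfl, by rw [hq], by rw [hq]; exact hb⟩
      · exact Or.inr ⟨x', Or.inr hx', hxe, hy⟩
    · rintro (h | ⟨x', (rfl | hx'), hxe, hy⟩)
      · exact Or.inl (Or.inl h)
      · exact Or.inl (Or.inr ⟨q.2, hy, by simp [hxe]⟩)
      · exact Or.inr ⟨x', hx', hxe, hy⟩

theorem mem_pvMark_fst (present : List String)
    (st : PySem.Set String × PySem.Set (String × String)) (a : String) :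
    a ∈ (pvMark present st).1 ↔ a ∈ st.1 ∨ a ∈ present := by
  exact pvMark_aux_fst present present st a

theorem mem_pvMark_snd (present : List String)
    (st : PySem.Set String × PySem.Set (String × String)) (q : String × String) :
    q ∈ (pvMark present st).2 ↔ q ∈ st.2 ∨ (q.1 ∈ present ∧ q.2 ∈ present) := by
  rw [pvMark, pvMark_aux_snd]
  constructor
  · rintro (h | ⟨x, hx, rfl, hy⟩)
    · exact Or.inl h
    · exact Or.inr ⟨hx, hy⟩
  · rintro (h | ⟨hx, hy⟩)
    · exact Or.inl h
    · exact Or.inr ⟨q.1, hx, rfl, hy⟩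

theorem mem_gather_fst (configs : List (List String)) (acc_set : PySem.Set String)
    (st : PySem.Set String × PySem.Set (String × String)) (a : String) :
    a ∈ (configs.foldl (fun st config =>
      pvMark (config.filter (fun a => PySem.Set.contains acc_set a)) st) st).1 ↔
    a ∈ st.1 ∨ ∃ c ∈ configs, a ∈ c ∧ a ∈ acc_set := by
  induction configs generalizing st with
  | nil => simp
  | cons c t ih =>
    simp only [List.foldl_cons, ih, mem_pvMark_fst, List.mem_filter, List.mem_cons,
      PySem.Set.contains_iff]
    constructor
    · rintro ((h | ⟨hc, hs⟩) | ⟨c', hc', h⟩)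
      · exact Or.inl h
      · exact Or.inr ⟨c, Or.inl rfl, hc, hs⟩
      · exact Or.inr ⟨c', Or.inr hc', h⟩
    · rintro (h | ⟨c', (rfl | hc'), h⟩)
      · exact Or.inl (Or.inl h)
      · exact Or.inl (Or.inr h)
      · exact Or.inr ⟨c', hc', h⟩

theorem mem_gather_snd (configs : List (List String)) (acc_set : PySem.Set String)
    (st : PySem.Set String × PySem.Set (String × String)) (q : String × String) :
    q ∈ (configs.foldl (fun st config =>
      pvMark (config.filter (fun a => PySem.Set.contains acc_set a)) st) st).2 ↔
    q ∈ st.2 ∨ ∃ c ∈ configs, (q.1 ∈ c ∧ q.1 ∈ acc_set) ∧ (q.2 ∈ c ∧ q.2 ∈ acc_set) := by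
  induction configs generalizing st with
  | nil => simp
  | cons c t ih =>
    simp only [List.foldl_cons, ih, mem_pvMark_snd, List.mem_filter, List.mem_cons,
      PySem.Set.contains_iff]
    constructor
    · rintro ((h | h) | ⟨c', hc', h⟩)
      · exact Or.inl h
      · exact Or.inr ⟨c, Or.inl rfl, h⟩
      · exact Or.inr ⟨c', Or.inr hc', h⟩
    · rintro (h | ⟨c', (rfl | hc'), h⟩)
      · exact Or.inl (Or.inl h)
      · exact Or.inl (Or.inr h)
      · exact Or.inr ⟨c', hc', h⟩

-- ===== VERDICT (by name: the statement is the Claim_ definition above) =====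
theorem find_incompatibilities_spec : Claim_equal_find_incompatibilities := by
  intro configs all_accessories _
  unfold Spec_find_incompatibilities find_incompatibilities find_incompatibilities_alt
  simp only
  congr 1
  apply PySem.List.foldl_congr_mem
  intro d p hp
  apply PySem.List.foldl_congr_mem
  intro d' acc2 hacc2
  have h1 : p.2 ∈ all_accessories := by
    rcases (PySem.List.mem_enumerate_iff _ _ _).1 hp with ⟨k, hk, rfl⟩
    exact List.getElem_mem hk
  have h2 : acc2 ∈ all_accessories := PySem.List.mem_of_mem_slice _ _ _ hacc2
  have hap : ∀ a : String, a ∈ all_accessories →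
      PySem.Set.contains (configs.foldl (fun st config =>
        pvMark (config.filter (fun a => PySem.Set.contains (PySem.Set.ofList all_accessories) a)) st)
        (PySem.Set.empty, PySem.Set.empty)).1 a
      = configs.any (fun config => config.contains a) := by
    intro a ha
    rw [Bool.eq_iff_iff, PySem.Set.contains_iff, mem_gather_fst, List.any_eq_true]
    constructor
    · rintro (h | ⟨c, hc, hac, _⟩)
      · simp [PySem.Set.empty] at h
      · exact ⟨c, hc, List.contains_iff_mem.2 hac⟩
    · rintro ⟨c, hc, hac⟩
      exact Or.inr ⟨c, hc, List.contains_iff_mem.1 hac, (PySem.Set.mem_ofList _ _).2 ha⟩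
  have htg : PySem.Set.contains (configs.foldl (fun st config =>
        pvMark (config.filter (fun a => PySem.Set.contains (PySem.Set.ofList all_accessories) a)) st)
        (PySem.Set.empty, PySem.Set.empty)).2 (p.2, acc2)
      = configs.any (fun config => config.contains p.2 && config.contains acc2) := by
    rw [Bool.eq_iff_iff, PySem.Set.contains_iff, mem_gather_snd, List.any_eq_true]
    constructor
    · rintro (h | ⟨c, hc, ⟨ha, _⟩, ⟨hb, _⟩⟩)
      · simp [PySem.Set.empty] at h
      · exact ⟨c, hc, by simpa using And.intro ha hb⟩
    · rintro ⟨c, hc, hab⟩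
      rw [Bool.and_eq_true] at hab
      exact Or.inr ⟨c, hc, ⟨List.contains_iff_mem.1 hab.1, (PySem.Set.mem_ofList _ _).2 h1⟩,
        ⟨List.contains_iff_mem.1 hab.2, (PySem.Set.mem_ofList _ _).2 h2⟩⟩
  simp only [hap p.2 h1, hap acc2 h2, htg]
  cases configs.any (fun config => config.contains p.2 && config.contains acc2) <;>
    cases configs.any (fun config => config.contains p.2) <;>
    cases configs.any (fun config => config.contains acc2) <;> simp
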